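-- pv_equiv track=rewrite | github.com/Gustavobgk/CS50P | week2/plate2.py | zero_checker
-- ===== SOURCE A (Python) =====
-- def zero_checker(s):
--     index = 0
--     for char in s:
--         if char.isdigit():
--             index += 1  # Corrected assignment
--             if index == 1 and char == "0":
--                 return False
--
--     return True
-- ===== SOURCE B (Python) =====
-- def zero_checker(s):
--     # Scan the string BACKWARDS with no early exit: each digit overwrites the
--     # verdict, so after the loop `verdict` holds the answer for the FIRST digit.
--     verdict = None
--     for c in reversed(s):
--         if c.isdigit():
--             verdict = (c != "0")
--     return True if verdict is None else verdict
-- ===== Notes on version B (the rewrite author's own statement) =====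
-- stated objective: alternative
-- what changed: Replaces A's forward scan with a digit counter and early return by a full backward traversal in which every digit overwrites a verdict flag, so the last write (the string's first digit) decides; no counter and no early exit.
import Mathlib
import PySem

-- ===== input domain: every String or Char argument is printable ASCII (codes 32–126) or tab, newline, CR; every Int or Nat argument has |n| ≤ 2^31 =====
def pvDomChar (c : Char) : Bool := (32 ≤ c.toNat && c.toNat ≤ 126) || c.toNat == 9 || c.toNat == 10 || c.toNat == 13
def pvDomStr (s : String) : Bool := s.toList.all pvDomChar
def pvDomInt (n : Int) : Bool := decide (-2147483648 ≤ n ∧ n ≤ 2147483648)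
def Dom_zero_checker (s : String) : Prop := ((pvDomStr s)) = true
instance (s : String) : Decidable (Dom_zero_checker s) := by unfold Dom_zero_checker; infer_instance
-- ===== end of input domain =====

-- B replaces A's forward scan with counter and early return by a full backward pass
-- where each digit overwrites a verdict flag (last write = first digit); objective: alternative.


-- ===== PORT A =====
-- loop over the characters carrying A's mutable counter `index`; the early
-- `return False` becomes the `false` branch of the recursion
def zero_checker_loop : List Char → Int → Bool
  | [], _ => true
  | c :: rest, index =>
    if PySem.Chars.isdigit c then
      let index := index + 1
      if index == 1 && c == '0' then false
      else zero_checker_loop rest index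
    else zero_checker_loop rest index

def zero_checker (s : String) : Bool := zero_checker_loop s.toList 0

-- ===== PORT B =====
-- `for c in reversed(s): if c.isdigit(): verdict = (c != "0")`, starting from None,
-- then `True if verdict is None else verdict`
def zero_checker_alt (s : String) : Bool :=
  let verdict : Option Bool :=
    s.toList.reverse.foldl
      (fun verdict c => if PySem.Chars.isdigit c then some (!(c == '0')) else verdict) none
  match verdict with
  | none => true
  | some b => b

-- ===== PRECONDITION & SPEC =====
def Spec_zero_checker (s : String) (out : Bool) : Prop := out = zero_checker_alt s
instance (s : String) (out : Bool) : Decidable (Spec_zero_checker s out) := by unfold Spec_zero_checker; infer_instance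

-- ===== CLAIM (what is proved, stated in full; the proofs are below) =====
def Claim_equal_zero_checker : Prop := ∀ (s : String), Dom_zero_checker s → Spec_zero_checker s (zero_checker s)

-- ===== LEMMAS AND PROOFS =====

-- once a digit has been counted (index ≥ 1), A's loop can never return False
theorem zero_checker_loop_pos (l : List Char) (i : Int) (hi : 1 ≤ i) :
    zero_checker_loop l i = true := by
  induction l generalizing i with
  | nil => rfl
  | cons c rest ih =>
    simp only [zero_checker_loop]
    split
    · have : ¬ ((i + 1 == 1 && c == '0') = true) := by
        simp only [Bool.and_eq_true, beq_iff_eq]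
        rintro ⟨h1, _⟩; omega
      simp only [this]
      exact ih (i + 1) (by omega)
    · exact ih i hi

-- B's backward fold, read as a foldr over the original order: the head digit wins
theorem zero_checker_main (l : List Char) :
    zero_checker_loop l 0 =
      (match l.foldr
          (fun c verdict => if PySem.Chars.isdigit c then some (!(c == '0')) else verdict)
          (none : Option Bool) with
        | none => true
        | some b => b) := by
  induction l with
  | nil => rfl
  | cons c rest ih =>
    simp only [zero_checker_loop, List.foldr_cons]
    by_cases hd : PySem.Chars.isdigit c
    · simp only [hd, if_true]
      by_cases h0 : c = '0'
      · subst h0; simp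
      · have hne : ((0 + 1 : Int) == 1 && c == '0') = false := by simp [h0]
        simp [zero_checker_loop_pos rest 1 le_rfl, h0]
    · simp only [Bool.not_eq_true] at hd
      simp [hd, ih]

-- ===== VERDICT (by name: the statement is the Claim_ definition above) =====
theorem zero_checker_spec : Claim_equal_zero_checker := by
  intro s _
  unfold Spec_zero_checker zero_checker zero_checker_alt
  rw [List.foldl_reverse]
  exact zero_checker_main s.toList
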